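-- pv_equiv track=rewrite | github.com/thssmonkey/ARCH_KG | kg_django/kg_building/code/main/buildSpecFromRawText.py | extract_item
-- ===== SOURCE A (Python) =====
-- def extract_item(origin_sentence):
-- 	prefixItem = ""
-- 	sub_len = 0
-- 	first_num_cnt = 0
-- 	first_dot_cnt = 0
-- 	for i in range(len(origin_sentence)):
-- 		c = origin_sentence[i]
-- 		if c.isalpha():
-- 			sub_len = i
-- 			break;
-- 		if c.isspace():
-- 			continue
-- 		prefixItem += c
-- 		if c.isdigit():
-- 			first_num_cnt += 1
-- 		elif c == '.':
-- 			first_dot_cnt += 1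
--
-- 	item_level = 4
-- 	if first_dot_cnt > 0 and first_num_cnt + first_dot_cnt == len(prefixItem):
-- 		item_level = 1
-- 	elif "(" in prefixItem or ")" in prefixItem:
-- 		item_level = 2
-- 	elif first_num_cnt + first_dot_cnt > 0:
-- 		item_level = 3
-- 	sentence = origin_sentence[sub_len:]
-- 	return item_level, prefixItem, sentence
-- ===== SOURCE B (Python) =====
-- def extract_item(origin_sentence):
--     idx = next((i for i, c in enumerate(origin_sentence) if c.isalpha()), None)
--     sub_len = idx if idx is not None else 0
--     prefix_region = origin_sentence if idx is None else origin_sentence[:idx]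
--     prefixItem = ''.join(c for c in prefix_region if not c.isspace())
--     first_num_cnt = sum(c.isdigit() for c in prefixItem)
--     first_dot_cnt = prefixItem.count('.')
--     if first_dot_cnt > 0 and first_num_cnt + first_dot_cnt == len(prefixItem):
--         item_level = 1
--     elif '(' in prefixItem or ')' in prefixItem:
--         item_level = 2
--     elif first_num_cnt + first_dot_cnt > 0:
--         item_level = 3
--     else:
--         item_level = 4
--     return item_level, prefixItem, origin_sentence[sub_len:]
-- ===== Notes on version B (the rewrite author's own statement) =====
-- stated objective: simpler
-- what changed: Replaces A's single accumulating indexed scan (building the prefix and both counters char by char with break/continue) by a boundary-find of the first alphabetic index followed by independent filter/count passes over the finished prefix.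
import Mathlib
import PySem

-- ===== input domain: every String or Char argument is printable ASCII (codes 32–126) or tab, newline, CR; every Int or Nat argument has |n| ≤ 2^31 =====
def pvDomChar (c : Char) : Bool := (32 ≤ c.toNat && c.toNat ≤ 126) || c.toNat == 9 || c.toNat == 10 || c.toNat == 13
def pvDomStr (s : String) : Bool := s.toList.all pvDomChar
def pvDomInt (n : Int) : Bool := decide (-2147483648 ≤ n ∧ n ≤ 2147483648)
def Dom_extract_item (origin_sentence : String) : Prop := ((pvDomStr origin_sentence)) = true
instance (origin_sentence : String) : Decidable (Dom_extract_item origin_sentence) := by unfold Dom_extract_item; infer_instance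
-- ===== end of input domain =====

-- B replaces A's single accumulating indexed scan by a boundary-find (first alphabetic index)
-- followed by independent filter/count passes over the finished prefix; objective: simpler decomposition.


-- ===== PORT A =====
-- loop over the characters carrying the absolute index i and the accumulators
-- (prefixItem, first_num_cnt, first_dot_cnt); returns (prefixItem, sub_len, num, dot).
-- sub_len is 0 when the loop runs off the end without a break, exactly as in A.
def extractLoopA (cs : List Char) (i : Nat) (pref : List Char) (num dot : Nat) :
    List Char × Nat × Nat × Nat :=
  match cs with
  | [] => (pref, 0, num, dot)
  | c :: rest =>
    if PySem.Chars.isalpha c then (pref, i, num, dot)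
    else if PySem.Chars.isspace c then extractLoopA rest (i+1) pref num dot
    else if PySem.Chars.isdigit c then extractLoopA rest (i+1) (pref ++ [c]) (num+1) dot
    else if c = '.' then extractLoopA rest (i+1) (pref ++ [c]) num (dot+1)
    else extractLoopA rest (i+1) (pref ++ [c]) num dot

def extract_item (origin_sentence : String) : Int × String × String :=
  let cs := origin_sentence.toList
  let r := extractLoopA cs 0 [] 0 0
  let pref := r.1
  let subLen := r.2.1
  let num := r.2.2.1
  let dot := r.2.2.2
  let itemLevel : Int :=
    if dot > 0 ∧ num + dot = pref.length then 1
    else if PySem.Chars.isIn ['('] pref ∨ PySem.Chars.isIn [')'] pref then 2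
    else if num + dot > 0 then 3
    else 4
  (itemLevel, String.ofList pref, String.ofList (cs.drop subLen))

-- ===== PORT B =====
def extract_item_alt (origin_sentence : String) : Int × String × String :=
  let cs := origin_sentence.toList
  let idx := cs.findIdx? PySem.Chars.isalpha
  let subLen := idx.getD 0
  let region := match idx with | none => cs | some i => cs.take i
  let prefixItem := region.filter (fun c => ¬ PySem.Chars.isspace c)
  let num := prefixItem.countP PySem.Chars.isdigit
  let dot := prefixItem.count '.'
  let itemLevel : Int :=
    if dot > 0 ∧ num + dot = prefixItem.length then 1
    else if PySem.Chars.isIn ['('] prefixItem ∨ PySem.Chars.isIn [')'] prefixItem then 2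
    else if num + dot > 0 then 3
    else 4
  (itemLevel, String.ofList prefixItem, String.ofList (cs.drop subLen))

-- ===== PRECONDITION & SPEC =====
def Spec_extract_item (origin_sentence : String) (out : Int × String × String) : Prop := out = extract_item_alt origin_sentence
instance (origin_sentence : String) (out : Int × String × String) : Decidable (Spec_extract_item origin_sentence out) := by unfold Spec_extract_item; infer_instance

-- ===== CLAIM (what is proved, stated in full; the proofs are below) =====
def Claim_equal_extract_item : Prop := ∀ (origin_sentence : String), Dom_extract_item origin_sentence → Spec_extract_item origin_sentence (extract_item origin_sentence)

-- ===== LEMMAS AND PROOFS =====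

-- A's loop computes exactly B's decomposition: the prefix filter and the two counts
-- over the region before the first alphabetic character, and its index (0 if none).
theorem extractLoopA_eq (cs : List Char) (i : Nat) (pref : List Char) (num dot : Nat) :
    extractLoopA cs i pref num dot =
      (pref ++ (match cs.findIdx? PySem.Chars.isalpha with
                | none => cs | some j => cs.take j).filter (fun c => ¬ PySem.Chars.isspace c),
       (match cs.findIdx? PySem.Chars.isalpha with | none => 0 | some j => i + j),
       num + ((match cs.findIdx? PySem.Chars.isalpha with
                | none => cs | some j => cs.take j).filter (fun c => ¬ PySem.Chars.isspace c)).countP PySem.Chars.isdigit,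
       dot + ((match cs.findIdx? PySem.Chars.isalpha with
                | none => cs | some j => cs.take j).filter (fun c => ¬ PySem.Chars.isspace c)).count '.') := by
  induction cs generalizing i pref num dot with
  | nil => simp [extractLoopA]
  | cons c rest ih =>
    by_cases ha : PySem.Chars.isalpha c
    · simp [extractLoopA, ha, List.findIdx?_cons]
    · by_cases hs : PySem.Chars.isspace c
      · simp [extractLoopA, ha, hs, ih, List.findIdx?_cons]
        cases rest.findIdx? PySem.Chars.isalpha with
        | none => simp [hs]
        | some j => simp [hs, Nat.add_comm, Nat.add_left_comm]
      · by_cases hd : PySem.Chars.isdigit c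
        · have hdot : c ≠ '.' := by rintro rfl; simp [PySem.Chars.isdigit] at hd
          simp [extractLoopA, ha, hs, hd, ih, List.findIdx?_cons]
          cases rest.findIdx? PySem.Chars.isalpha with
          | none => simp [hs, hd, List.countP_cons, List.count_cons, hdot, Nat.add_comm, Nat.add_assoc, Nat.add_left_comm]
          | some j => simp [hs, hd, List.countP_cons, List.count_cons, hdot, Nat.add_comm, Nat.add_assoc, Nat.add_left_comm]
        · by_cases hp : c = '.'
          · subst hp
            simp [extractLoopA, ha, hs, hd, ih, List.findIdx?_cons]
            cases rest.findIdx? PySem.Chars.isalpha with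
            | none => simp [hs, hd, List.count_cons, Nat.add_comm, Nat.add_left_comm]
            | some j => simp [hs, hd, List.count_cons, Nat.add_comm, Nat.add_left_comm]
          · simp [extractLoopA, ha, hs, hd, hp, ih, List.findIdx?_cons]
            cases rest.findIdx? PySem.Chars.isalpha with
            | none => simp [hs, hd, hp]
            | some j => simp [hs, hd, List.count_cons, hp, Nat.add_comm, Nat.add_left_comm]

-- ===== VERDICT (by name: the statement is the Claim_ definition above) =====
theorem extract_item_spec : Claim_equal_extract_item := by
  intro s _
  unfold Spec_extract_item extract_item extract_item_alt
  simp only [extractLoopA_eq, List.nil_append, Nat.zero_add]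
  cases h : (s.toList).findIdx? PySem.Chars.isalpha with
  | none => simp
  | some j => simp
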